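-- pv_equiv track=rewrite | github.com/hhk9292/algorithm | 2018KAKAOBLIND/6.py | num_to_hash
-- ===== SOURCE A (Python) =====
-- def num_to_hash(n, num):
--     temp = ''
--     while len(temp) < n:
--         if num % 2:
--             temp = '#' + temp
--         else:
--             temp = ' ' + temp
--         num = num // 2
--     return temp
-- ===== SOURCE B (Python) =====
-- def num_to_hash(n, num):
--     if n <= 0:
--         return ''
--     bits = format(num % (1 << n), '0{}b'.format(n))
--     return bits.translate(str.maketrans('10', '# '))
-- ===== Notes on version B (the rewrite author's own statement) =====
-- stated objective: faster
-- what changed: Replaces the manual shift-and-prepend while loop (which rebuilds the string by prepending one character per iteration, O(n^2) copying) with masking num to its low n bits (num % 2**n), formatting that value once as an n-wide zero-padded binary string, and translating '1'/'0' to '#'/' '.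
import Mathlib
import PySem

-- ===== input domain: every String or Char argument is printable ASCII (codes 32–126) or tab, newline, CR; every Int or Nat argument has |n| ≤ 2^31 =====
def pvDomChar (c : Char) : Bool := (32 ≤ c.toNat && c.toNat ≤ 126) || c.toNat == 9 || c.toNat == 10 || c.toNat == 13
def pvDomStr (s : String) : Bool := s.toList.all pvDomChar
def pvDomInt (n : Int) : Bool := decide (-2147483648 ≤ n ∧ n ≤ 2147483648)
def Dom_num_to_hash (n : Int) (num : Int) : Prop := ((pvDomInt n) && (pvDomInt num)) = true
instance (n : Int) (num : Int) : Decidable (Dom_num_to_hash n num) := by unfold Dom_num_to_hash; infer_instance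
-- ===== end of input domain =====

-- B replaces A's shift-and-prepend loop by masking to the low n bits (num % 2^n) and
-- formatting that value as an n-wide zero-padded binary string, then substituting characters
-- (objective: faster — avoids per-iteration string prepending; same exact output).

-- ===== PORT A =====
-- the while loop: state (temp, num); prepend '#'/' ' according to num % 2, then num //= 2
def numToHashLoop (n : Int) (temp : List Char) (num : Int) : List Char :=
  if _h : (temp.length : Int) < n then
    numToHashLoop n ((if PySem.Int.mod num 2 ≠ 0 then '#' else ' ') :: temp)
      (PySem.Int.floordiv num 2)
  else temp
  termination_by (n - temp.length).toNat
  decreasing_by simp only [List.length_cons]; push_cast; omega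

def num_to_hash (n : Int) (num : Int) : String := String.mk (numToHashLoop n [] num)

-- ===== PORT B =====
-- str.translate(str.maketrans('10', '# ')): a character map
def pyTrans10 (c : Char) : Char := if c = '1' then '#' else if c = '0' then ' ' else c

-- binary digits of m, most significant first; [] for m = 0 (format's digit loop)
def binDigits (m : Nat) : List Char :=
  if _h : m = 0 then [] else binDigits (m / 2) ++ [if m % 2 = 1 then '1' else '0']
  termination_by m
  decreasing_by omega

-- format(m, '0{w}b'): binary of m ('0' for m = 0), zero-padded on the left to width w;
-- exact for m ≥ 0 (here m = num % 2^n ≥ 0)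
def binFmt (w m : Nat) : List Char :=
  let ds := if m = 0 then ['0'] else binDigits m
  List.replicate (w - ds.length) '0' ++ ds

def num_to_hash_alt (n : Int) (num : Int) : String :=
  if n ≤ 0 then ""
  else String.mk ((binFmt n.toNat (PySem.Int.mod num ((2 : Int) ^ n.toNat)).toNat).map pyTrans10)

-- ===== PRECONDITION & SPEC =====
def Spec_num_to_hash (n : Int) (num : Int) (out : String) : Prop := out = num_to_hash_alt n num
instance (n : Int) (num : Int) (out : String) : Decidable (Spec_num_to_hash n num out) := by unfold Spec_num_to_hash; infer_instance

-- ===== CLAIM (what is proved, stated in full; the proofs are below) =====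
def Claim_equal_num_to_hash : Prop := ∀ (n : Int) (num : Int), Dom_num_to_hash n num → Spec_num_to_hash n num (num_to_hash n num)

-- ===== LEMMAS AND PROOFS =====

-- the k characters A's loop prepends, as a function of the remaining count k
def padGo : Nat → Int → List Char
  | 0, _ => []
  | k+1, num => padGo k (PySem.Int.floordiv num 2) ++ [if PySem.Int.mod num 2 ≠ 0 then '#' else ' ']

-- Nat version working on the masked value
def padNat : Nat → Nat → List Char
  | 0, _ => []
  | k+1, m => padNat k (m / 2) ++ [if m % 2 = 1 then '#' else ' ']

theorem loop_eq (n : Int) (temp : List Char) (num : Int) :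
    numToHashLoop n temp num = padGo (n - temp.length).toNat num ++ temp := by
  fun_induction numToHashLoop n temp num with
  | case1 temp num h ih =>
      simp only [dite_eq_ite] at ih
      rw [ih]
      have hk : (n - (temp.length : Int)).toNat =
          (n - ((((if PySem.Int.mod num 2 ≠ 0 then '#' else ' ') :: temp).length : Int))).toNat + 1 := by
        simp only [List.length_cons]; push_cast at h ⊢; omega
      rw [hk]
      simp [padGo, List.append_assoc]
  | case2 temp num h =>
      have : (n - (temp.length : Int)).toNat = 0 := by omega
      simp [this, padGo]

theorem ediv2_emod (a P : Int) (hP : 0 < P) : (a / 2) % P = (a % (2 * P)) / 2 := by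
  have h2P : 0 < 2 * P := by omega
  have ha : 2 * P * (a / (2 * P)) + a % (2 * P) = a := Int.mul_ediv_add_emod a (2 * P)
  set q := a / (2 * P) with hq
  set r := a % (2 * P) with hr
  have hr0 : 0 ≤ r := Int.emod_nonneg a (by omega)
  have hr1 : r < 2 * P := Int.emod_lt_of_pos a h2P
  have hdiv : a / 2 = r / 2 + P * q := by
    have ha' : a = r + (P * q) * 2 := by linarith
    rw [ha', Int.add_mul_ediv_right _ _ (by norm_num : (2:Int) ≠ 0)]
  rw [hdiv]
  have h1 : (r / 2 + P * q) % P = (r / 2) % P := Int.add_mul_emod_self_left _ _ _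
  rw [h1]
  exact Int.emod_eq_of_lt (Int.ediv_nonneg hr0 (by norm_num)) (by omega)

theorem emod2_eq (a P : Int) (_hP : 0 < P) : a % 2 = (a % (2 * P)) % 2 := by
  have ha : 2 * P * (a / (2 * P)) + a % (2 * P) = a := Int.mul_ediv_add_emod a (2 * P)
  set t := P * (a / (2 * P)) with ht
  set r := a % (2 * P) with hr
  have h : a = 2 * t + r := by linarith [ha]
  omega

theorem padGo_eq_padNat (k : Nat) (num : Int) :
    padGo k num = padNat k ((num % ((2 : Int) ^ k)).toNat) := by
  induction k generalizing num with
  | zero => rfl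
  | succ k ih =>
      have hPk : (0 : Int) < 2 ^ k := by positivity
      have hfd : PySem.Int.floordiv num 2 = num / 2 :=
        PySem.Int.floordiv_eq_ediv_of_pos (by norm_num)
      have hmd : PySem.Int.mod num 2 = num % 2 :=
        PySem.Int.mod_eq_emod_of_pos (by norm_num)
      have hpow : ((2:Int) ^ (k+1)) = 2 * 2 ^ k := by ring
      have hr0 : 0 ≤ num % ((2:Int) ^ (k+1)) := Int.emod_nonneg num (by positivity)
      have hdiv : (num / 2) % ((2:Int) ^ k) = (num % ((2:Int) ^ (k+1))) / 2 := by
        rw [hpow]; exact ediv2_emod num _ hPk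
      have hmod : num % 2 = (num % ((2:Int) ^ (k+1))) % 2 := by
        rw [hpow]; exact emod2_eq num _ hPk
      have htoNat : ((num % ((2:Int) ^ (k+1))) / 2).toNat =
          (num % ((2:Int) ^ (k+1))).toNat / 2 := by omega
      have hbit : (PySem.Int.mod num 2 ≠ 0) ↔ ((num % ((2:Int) ^ (k+1))).toNat % 2 = 1) := by
        rw [hmd]; omega
      show padGo k (PySem.Int.floordiv num 2) ++ _ = padNat k _ ++ _
      rw [ih, hfd, hdiv, htoNat]
      congr 1
      rw [if_congr hbit rfl rfl]

theorem padNat_zero (k : Nat) : padNat k 0 = List.replicate k ' ' := by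
  induction k with
  | zero => rfl
  | succ k ih => simp [padNat, ih, List.replicate_succ']

theorem padNat_pos (k m : Nat) (hm : 0 < m) (hlt : m < 2 ^ k) :
    padNat k m = List.replicate (k - (binDigits m).length) ' ' ++ (binDigits m).map pyTrans10 := by
  induction k generalizing m with
  | zero => omega
  | succ k ih =>
      have hds : binDigits m = binDigits (m / 2) ++ [if m % 2 = 1 then '1' else '0'] := by
        rw [binDigits]; simp [Nat.pos_iff_ne_zero.mp hm]
      have hbit : pyTrans10 (if m % 2 = 1 then '1' else '0') =
          (if m % 2 = 1 then '#' else ' ') := by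
        by_cases h : m % 2 = 1 <;> simp [h, pyTrans10]
      by_cases h2 : m / 2 = 0
      · have hm1 : m = 1 := by omega
        subst hm1
        show padNat k 0 ++ _ = _
        rw [padNat_zero, hds]
        simp [binDigits, pyTrans10]
      · have h2pos : 0 < m / 2 := by omega
        have h2lt : m / 2 < 2 ^ k := by
          have : (2:Nat) ^ (k+1) = 2 * 2 ^ k := by ring
          omega
        show padNat k (m / 2) ++ _ = _
        rw [ih (m / 2) h2pos h2lt, hds]
        simp [List.length_append, List.map_append, hbit, List.append_assoc]

theorem padNat_eq_binFmt (k m : Nat) (hk : 0 < k) (hlt : m < 2 ^ k) :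
    padNat k m = (binFmt k m).map pyTrans10 := by
  by_cases hm : m = 0
  · subst hm
    rw [padNat_zero]
    show List.replicate k ' ' = (List.replicate (k - 1) '0' ++ ['0']).map pyTrans10
    rw [List.map_append, List.map_replicate,
      (by decide : pyTrans10 '0' = ' '), (by decide : List.map pyTrans10 ['0'] = [' ']),
      ← List.replicate_succ']
    congr 1
    omega
  · rw [padNat_pos k m (by omega) hlt]
    simp only [binFmt]
    simp [hm, List.map_replicate, (by decide : pyTrans10 '0' = ' ')]

-- ===== VERDICT (by name: the statement is the Claim_ definition above) =====
theorem num_to_hash_spec : Claim_equal_num_to_hash := by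
  intro n num _
  unfold Spec_num_to_hash num_to_hash num_to_hash_alt
  by_cases hn : n ≤ 0
  · rw [numToHashLoop, dif_neg (by simp; omega), if_pos hn]
    rfl
  · rw [if_neg hn]
    have hn' : 0 < n := by omega
    have hk : 0 < n.toNat := by omega
    rw [loop_eq]
    simp only [List.length_nil, Nat.cast_zero, List.append_nil]
    have h0 : (n - (0:Int)).toNat = n.toNat := by omega
    rw [h0]
    have hP : (0:Int) < 2 ^ n.toNat := by positivity
    have hmd : PySem.Int.mod num ((2:Int) ^ n.toNat) = num % ((2:Int) ^ n.toNat) :=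
      PySem.Int.mod_eq_emod_of_pos hP
    have hlt : (num % ((2:Int) ^ n.toNat)).toNat < 2 ^ n.toNat := by
      have h1 : num % ((2:Int) ^ n.toNat) < 2 ^ n.toNat := Int.emod_lt_of_pos num hP
      have h2 : ((2:Nat) ^ n.toNat : Int) = (2:Int) ^ n.toNat := by push_cast; rfl
      omega
    rw [padGo_eq_padNat, padNat_eq_binFmt n.toNat _ hk hlt, hmd]
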